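-- pv_equiv track=rewrite | github.com/jakechai/ComfyUI-JakeUpgrade | nodes/jake_node_prompt_random.py | _arrange_components_by_priority
-- ===== SOURCE A (Python) =====
-- from typing import List, Dict, Any, Tuple
--
-- def _arrange_components_by_priority(components_dict: Dict[str, str], priority: str) -> List[str]:
--     """根据优先级设置安排组件顺序"""
--     priority_orders = {
--         "subject + scene": [
--             "subject", "scene", "motion", "facial_action", "expression",
--             "lighting", "camera", "style", "description"
--         ],
--         "description + style": [
--             "description", "style", "subject", "scene", "motion",
--             "facial_action", "expression", "lighting", "camera"
--         ],
--         "description + style + lighting + camera": [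
--             "description", "style", "lighting", "camera", "subject",
--             "scene", "motion", "facial_action", "expression"
--         ],
--         "lighting + camera": [
--             "lighting", "camera", "subject", "scene", "motion",
--             "facial_action", "expression", "style", "description"
--         ]
--     }
--
--     # 获取对应的顺序，如果找不到则使用默认顺序
--     order = priority_orders.get(priority, priority_orders["subject + scene"])
--
--     # 按照顺序提取组件，只保留有值的组件
--     arranged_components = []
--     for key in order:
--         if key in components_dict and components_dict[key]:
--             arranged_components.append(components_dict[key])
--
--     return arranged_components
-- ===== SOURCE B (Python) =====
-- def _arrange_components_by_priority(components_dict, priority):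
--     priority_orders = {
--         "subject + scene": [
--             "subject", "scene", "motion", "facial_action", "expression",
--             "lighting", "camera", "style", "description"
--         ],
--         "description + style": [
--             "description", "style", "subject", "scene", "motion",
--             "facial_action", "expression", "lighting", "camera"
--         ],
--         "description + style + lighting + camera": [
--             "description", "style", "lighting", "camera", "subject",
--             "scene", "motion", "facial_action", "expression"
--         ],
--         "lighting + camera": [
--             "lighting", "camera", "subject", "scene", "motion",
--             "facial_action", "expression", "style", "description"
--         ]
--     }
--     order = priority_orders.get(priority, priority_orders["subject + scene"])
--     rank = {key: i for i, key in enumerate(order)}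
--     kept = [(k, v) for k, v in components_dict.items() if k in rank and v]
--     kept.sort(key=lambda kv: rank[kv[0]])
--     return [v for _, v in kept]
-- ===== Notes on version B (the rewrite author's own statement) =====
-- stated objective: alternative
-- what changed: Instead of scanning the fixed order list and probing the dict for each key, B builds a key-to-index rank table from the chosen order, filters the dict's own items down to ranked truthy entries, and sorts them by rank; Pre_ only excludes association lists with duplicate keys, which cannot arise from a Python dict (A uses the first match, B would keep every duplicate).
import Mathlib
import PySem

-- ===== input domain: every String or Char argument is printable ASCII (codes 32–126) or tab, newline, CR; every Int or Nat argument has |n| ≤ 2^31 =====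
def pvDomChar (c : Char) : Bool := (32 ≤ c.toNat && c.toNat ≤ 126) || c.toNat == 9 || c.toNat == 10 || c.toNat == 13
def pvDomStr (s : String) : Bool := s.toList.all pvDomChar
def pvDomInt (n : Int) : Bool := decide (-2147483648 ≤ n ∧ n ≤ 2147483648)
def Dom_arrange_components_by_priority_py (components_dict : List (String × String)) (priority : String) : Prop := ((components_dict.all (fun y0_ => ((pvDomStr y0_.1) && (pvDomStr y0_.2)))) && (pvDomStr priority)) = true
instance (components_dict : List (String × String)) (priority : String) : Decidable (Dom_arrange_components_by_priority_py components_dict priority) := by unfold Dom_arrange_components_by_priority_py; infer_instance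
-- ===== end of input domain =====

-- B replaces A's scan over the priority order (probing the dict per key) by a rank
-- table over the chosen order plus a rank-sort of the dict's own truthy items
-- (objective: alternative decomposition, same cost on these tiny inputs).

-- the literal priority_orders dict (identical text in both Pythons)
def pvPriorityOrders : PySem.Dict String (List String) :=
  PySem.Dict.mk [
    ("subject + scene",
      ["subject", "scene", "motion", "facial_action", "expression",
       "lighting", "camera", "style", "description"]),
    ("description + style",
      ["description", "style", "subject", "scene", "motion",
       "facial_action", "expression", "lighting", "camera"]),
    ("description + style + lighting + camera",
      ["description", "style", "lighting", "camera", "subject",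
       "scene", "motion", "facial_action", "expression"]),
    ("lighting + camera",
      ["lighting", "camera", "subject", "scene", "motion",
       "facial_action", "expression", "style", "description"])]

-- order = priority_orders.get(priority, priority_orders["subject + scene"])
def pvOrder (priority : String) : List String :=
  pvPriorityOrders.getD priority (pvPriorityOrders.getD "subject + scene" [])

-- ===== PORT A =====
def arrange_components_by_priority_py (components_dict : List (String × String)) (priority : String) : List String :=
  let d := PySem.Dict.mk components_dict
  let order := pvOrder priority
  -- for key in order: if key in components_dict and components_dict[key]: append components_dict[key]
  order.foldl (fun acc key =>
    match d.get? key with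
    | some v => if v ≠ "" then acc ++ [v] else acc
    | none => acc) []

-- ===== PORT B =====
def arrange_components_by_priority_py_alt (components_dict : List (String × String)) (priority : String) : List String :=
  let order := pvOrder priority
  -- rank = {key: i for i, key in enumerate(order)}
  let rank : PySem.Dict String Int :=
    (PySem.List.enumerate order 0).foldl (fun d p => d.insert p.2 p.1) PySem.Dict.empty
  -- kept = [(k, v) for k, v in components_dict.items() if k in rank and v]
  let kept := (PySem.Dict.mk components_dict).items.filter
    (fun kv => rank.contains kv.1 && !(kv.2 == ""))
  -- kept.sort(key=lambda kv: rank[kv[0]])   (every kept key is in rank, so rank[kv[0]] = getD kv.1 0)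
  let sortedKept := PySem.List.sorted kept (fun kv => rank.getD kv.1 0) false
  -- return [v for _, v in kept]
  sortedKept.map (fun kv => kv.2)

-- ===== PRECONDITION & SPEC =====
-- Pre_ excludes association lists with duplicate keys: a Python dict can never
-- contain them, so no actual Python input is excluded; on such lists A's
-- first-match lookup and B's keep-every-item traversal are both accidental.
def Pre_arrange_components_by_priority_py (components_dict : List (String × String)) (priority : String) : Prop :=
  (components_dict.map Prod.fst).Nodup

instance (components_dict : List (String × String)) (priority : String) : Decidable (Pre_arrange_components_by_priority_py components_dict priority) := by unfold Pre_arrange_components_by_priority_py; infer_instance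

def pvWitness_arrange_components_by_priority_py : (List (String × String)) × String :=
  ([("subject", "a cat"), ("scene", "park"), ("style", "")], "lighting + camera")

def Spec_arrange_components_by_priority_py (components_dict : List (String × String)) (priority : String) (out : List String) : Prop := out = arrange_components_by_priority_py_alt components_dict priority
instance (components_dict : List (String × String)) (priority : String) (out : List String) : Decidable (Spec_arrange_components_by_priority_py components_dict priority out) := by unfold Spec_arrange_components_by_priority_py; infer_instance

-- ===== CLAIM (what is proved, stated in full; the proofs are below) =====
def Claim_equal_arrange_components_by_priority_py : Prop := ∀ (components_dict : List (String × String)) (priority : String), Dom_arrange_components_by_priority_py components_dict priority → Pre_arrange_components_by_priority_py components_dict priority → Spec_arrange_components_by_priority_py components_dict priority (arrange_components_by_priority_py components_dict priority)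

-- ===== LEMMAS AND PROOFS =====

-- whichever branch of priority_orders.get is taken, the order list has distinct keys
theorem pvOrder_nodup (p : String) : (pvOrder p).Nodup := by
  rw [pvOrder, PySem.Dict.getD_eq_get?_getD]
  rw [show pvPriorityOrders.getD "subject + scene" [] =
      ["subject", "scene", "motion", "facial_action", "expression",
       "lighting", "camera", "style", "description"] from by decide]
  rw [pvPriorityOrders]
  simp only [PySem.Dict.get?_mk_cons]
  split_ifs <;> simp [PySem.Dict.get?]

-- B's rank table, named for the proofs
def rankOf (L : List String) : PySem.Dict String Int :=
  (PySem.List.enumerate L 0).foldl (fun d p => d.insert p.2 p.1) PySem.Dict.empty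

theorem rank_items (L : List String) (hL : L.Nodup) :
    (rankOf L).items = (PySem.List.enumerate L 0).map (fun p => (p.2, p.1)) := by
  have := PySem.Dict.items_foldl_insert_fresh (l := PySem.List.enumerate L 0)
    (k := fun p => p.2) (v := fun p => p.1) (d := PySem.Dict.empty)
    (by intro a _; rfl) (by rw [PySem.List.map_snd_enumerate]; exact hL)
  simpa [rankOf] using this

theorem rank_keys (L : List String) (hL : L.Nodup) : (rankOf L).keys = L := by
  show ((rankOf L).items.map Prod.fst) = L
  rw [rank_items L hL, List.map_map]
  have : (Prod.fst ∘ fun p : Int × String => (p.2, p.1)) = fun p => p.2 := rfl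
  rw [this, PySem.List.map_snd_enumerate]

theorem rank_contains (L : List String) (hL : L.Nodup) (k : String) :
    (rankOf L).contains k = true ↔ k ∈ L := by
  rw [PySem.Dict.contains_iff_mem_keys, rank_keys L hL]

theorem rank_getD (L : List String) (hL : L.Nodup) (i : Nat) (h : i < L.length) :
    (rankOf L).getD L[i] 0 = (i : Int) := by
  apply PySem.Dict.getD_of_mem_items
  · rw [rank_items L hL]
    refine List.mem_map.mpr ⟨((i : Int), L[i]), ?_, rfl⟩
    exact (PySem.List.mem_enumerate_iff L 0 _).mpr ⟨i, h, by simp⟩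
  · rw [show (rankOf L).keys = L from rank_keys L hL]; exact hL

theorem rank_pairwise (L : List String) (hL : L.Nodup) :
    L.Pairwise (fun a b => (rankOf L).getD a 0 < (rankOf L).getD b 0) := by
  rw [List.pairwise_iff_getElem]
  intro i j hi hj hij
  rw [rank_getD L hL i hi, rank_getD L hL j hj]
  exact_mod_cast hij

-- the pair A would keep for a key, if any
def fA (d : PySem.Dict String String) (k : String) : Option (String × String) :=
  match d.get? k with
  | some v => if v ≠ "" then some (k, v) else none
  | none => none

theorem foldA_eq (d : PySem.Dict String String) (L : List String) (acc : List String) :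
    L.foldl (fun acc key =>
      match d.get? key with
      | some v => if v ≠ "" then acc ++ [v] else acc
      | none => acc) acc = acc ++ (L.filterMap (fA d)).map (fun kv => kv.2) := by
  induction L generalizing acc with
  | nil => simp
  | cons x t ih =>
    simp only [List.foldl_cons, List.filterMap_cons, fA]
    cases hx : d.get? x with
    | none => simpa [fA, hx] using ih acc
    | some v =>
      by_cases hv : v = ""
      · simp only [hv, ne_eq, not_true_eq_false, if_false]
        simpa [fA, hx, hv] using ih acc
      · simp only [ne_eq, hv, not_false_eq_true, if_true]
        rw [ih (acc ++ [v])]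
        simp [fA]

theorem target_mem (d : PySem.Dict String String) (L : List String)
    (p : String × String) :
    p ∈ L.filterMap (fA d) ↔ p.1 ∈ L ∧ d.get? p.1 = some p.2 ∧ p.2 ≠ "" := by
  rw [List.mem_filterMap]
  constructor
  · rintro ⟨k, hk, hf⟩
    unfold fA at hf
    cases hg : d.get? k with
    | none => rw [hg] at hf; simp at hf
    | some v =>
      rw [hg] at hf
      by_cases hv : v = "" <;> simp [hv] at hf
      rcases hf with rfl
      exact ⟨hk, by simpa using hg, hv⟩
  · rintro ⟨hk, hg, hv⟩
    exact ⟨p.1, hk, by unfold fA; rw [hg]; simp [hv]⟩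

theorem fA_key (d : PySem.Dict String String) (a : String) (b : String × String)
    (hb : b ∈ fA d a) : b.1 = a := by
  rw [Option.mem_def] at hb
  unfold fA at hb
  cases hg : d.get? a with
  | none => rw [hg] at hb; simp at hb
  | some v =>
    rw [hg] at hb
    by_cases hv : v = "" <;> simp [hv] at hb
    rw [← hb]

theorem target_nodup (d : PySem.Dict String String) (L : List String) (hL : L.Nodup) :
    (L.filterMap (fA d)).Nodup := by
  apply hL.filterMap
  intro a a' b hb hb'
  rw [← fA_key d a b hb, ← fA_key d a' b hb']

theorem kept_mem (cd : List (String × String)) (hcd : (cd.map Prod.fst).Nodup)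
    (L : List String) (hL : L.Nodup) (p : String × String) :
    p ∈ (PySem.Dict.mk cd).items.filter
        (fun kv => (rankOf L).contains kv.1 && !(kv.2 == "")) ↔
      p.1 ∈ L ∧ (PySem.Dict.mk cd).get? p.1 = some p.2 ∧ p.2 ≠ "" := by
  rw [List.mem_filter]
  have hk : (PySem.Dict.mk cd).keys.Nodup := hcd
  rw [PySem.Dict.get?_eq_some_iff_mem_items _ _ _ hk]
  constructor
  · rintro ⟨hm, hb⟩
    simp only [Bool.and_eq_true, Bool.not_eq_eq_eq_not, Bool.not_true, beq_eq_false_iff_ne] at hb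
    exact ⟨(rank_contains L hL p.1).mp hb.1, hm, hb.2⟩
  · rintro ⟨h1, h2, h3⟩
    refine ⟨h2, ?_⟩
    simp only [Bool.and_eq_true, Bool.not_eq_eq_eq_not, Bool.not_true, beq_eq_false_iff_ne]
    exact ⟨(rank_contains L hL p.1).mpr h1, h3⟩

theorem target_pairwise (d : PySem.Dict String String) (L : List String) (hL : L.Nodup) :
    (L.filterMap (fA d)).Pairwise
      (fun a b => (rankOf L).getD a.1 0 < (rankOf L).getD b.1 0) := by
  rw [List.pairwise_filterMap]
  refine (rank_pairwise L hL).imp_of_mem ?_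
  intro a b ha hb hlt x hx y hy
  rw [fA_key d a x hx, fA_key d b y hy]
  exact hlt

theorem main_lemma (L : List String) (hL : L.Nodup)
    (cd : List (String × String)) (hcd : (cd.map Prod.fst).Nodup) :
    L.foldl (fun acc key =>
      match (PySem.Dict.mk cd).get? key with
      | some v => if v ≠ "" then acc ++ [v] else acc
      | none => acc) []
    =
    (PySem.List.sorted
      (((PySem.Dict.mk cd)).items.filter
        (fun kv => ((PySem.List.enumerate L 0).foldl (fun d p => d.insert p.2 p.1) PySem.Dict.empty).contains kv.1 && !(kv.2 == "")))
      (fun kv => ((PySem.List.enumerate L 0).foldl (fun d p => d.insert p.2 p.1) PySem.Dict.empty).getD kv.1 0) false).map (fun kv => kv.2) := by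
  have hrank : ((PySem.List.enumerate L 0).foldl (fun d p => d.insert p.2 p.1) PySem.Dict.empty) = rankOf L := rfl
  rw [hrank]
  have hkept : (PySem.List.sorted
      ((PySem.Dict.mk cd).items.filter (fun kv => (rankOf L).contains kv.1 && !(kv.2 == "")))
      (fun kv => (rankOf L).getD kv.1 0) false) = L.filterMap (fA (PySem.Dict.mk cd)) := by
    apply PySem.List.sorted_eq_of_perm_of_pairwise_lt
    · rw [List.perm_ext_iff_of_nodup (target_nodup (PySem.Dict.mk cd) L hL)
        ((List.Nodup.of_map Prod.fst hcd).filter _)]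
      intro p
      rw [target_mem (PySem.Dict.mk cd) L p, kept_mem cd hcd L hL p]
    · exact target_pairwise (PySem.Dict.mk cd) L hL
  rw [hkept, foldA_eq (PySem.Dict.mk cd) L []]
  simp

-- ===== VERDICT (by name: the statement is the Claim_ definition above) =====
theorem arrange_components_by_priority_py_spec : Claim_equal_arrange_components_by_priority_py := by
  intro cd priority _hdom hpre
  unfold Spec_arrange_components_by_priority_py arrange_components_by_priority_py arrange_components_by_priority_py_alt
  exact main_lemma (pvOrder priority) (pvOrder_nodup priority) cd hpre
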